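-- pv_equiv track=rewrite | github.com/redlizzxy/EnvMeta | scripts/build_kegg_snapshot.py | _parse_flat
-- ===== SOURCE A (Python) =====
-- def _parse_flat(body: str) -> dict[str, list[str]]:
--     """把 KEGG flat text 解析成 {section: [lines]}。section 开头大写，续行缩进。"""
--     out: dict[str, list[str]] = {}
--     current = None
--     for line in body.splitlines():
--         if not line:
--             continue
--         if line[0] != " ":
--             # 新 section
--             parts = line.split(None, 1)
--             current = parts[0]
--             out.setdefault(current, [])
--             if len(parts) > 1:
--                 out[current].append(parts[1])
--         else:
--             if current is not None:
--                 out[current].append(line.strip())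
--     return out
-- ===== SOURCE B (Python) =====
-- def _parse_flat(body: str) -> dict[str, list[str]]:
--     """Grouping decomposition: collect header-led groups first, then build the dict per group."""
--     lines = [ln for ln in body.splitlines() if ln]
--     groups: list[list[str]] = []
--     for ln in lines:
--         if ln[0] != " ":
--             groups.append([ln])
--         elif groups:
--             groups[-1].append(ln)
--     out: dict[str, list[str]] = {}
--     for header, *cont in groups:
--         parts = header.split(None, 1)
--         out.setdefault(parts[0], []).extend(parts[1:] + [c.strip() for c in cont])
--     return out
-- ===== Notes on version B (the rewrite author's own statement) =====
-- stated objective: alternative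
-- what changed: Replaces A's single pass with inline running state (out dict + current section) by a two-phase decomposition: first group the non-empty lines into header-led groups (dropping pre-header indented lines), then fold each complete group into the dict with one setdefault/extend per group.
import Mathlib
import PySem

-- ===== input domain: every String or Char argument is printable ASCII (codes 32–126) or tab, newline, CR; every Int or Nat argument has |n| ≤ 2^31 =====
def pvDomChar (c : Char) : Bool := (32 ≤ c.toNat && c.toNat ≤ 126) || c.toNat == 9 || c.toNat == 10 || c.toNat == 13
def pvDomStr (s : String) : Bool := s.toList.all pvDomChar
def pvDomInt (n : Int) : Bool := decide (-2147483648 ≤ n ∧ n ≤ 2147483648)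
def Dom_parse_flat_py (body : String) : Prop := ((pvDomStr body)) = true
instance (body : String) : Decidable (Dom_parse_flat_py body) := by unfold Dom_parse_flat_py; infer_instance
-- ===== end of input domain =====

-- B re-implements A by a different decomposition (group the lines under their headers first,
-- then build the dict one complete group at a time); same cost, objective: alternative.

-- ===== PORT A =====
-- A-side helper: the body of A's 'for line in body.splitlines()' loop over state (out, current)
def pvStepA (st : PySem.Dict String (List String) × Option String) (line : String) :
    PySem.Dict String (List String) × Option String :=
  if line = "" then st
  else if PySem.Str.pyGet? line 0 ≠ some ' ' then
    match PySem.Str.split₀Max line 1 with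
    | [] => st          -- Python raises IndexError (parts[0]) here; excluded by Pre_
    | p0 :: rest =>
      let d := st.1.setdefault p0 []
      match rest with
      | [] => (d, some p0)
      | p1 :: _ => (d.modify p0 [] (· ++ [p1]), some p0)
  else
    match st.2 with
    | none => st
    | some cur => (st.1.modify cur [] (· ++ [PySem.Str.strip line]), some cur)

def parse_flat_py (body : String) : List (String × List String) :=
  ((PySem.Str.splitlines body).foldl pvStepA
    ((PySem.Dict.empty : PySem.Dict String (List String)), (none : Option String))).1.items

-- ===== PORT B =====
-- B-side helper: one step of the grouping loop (append a header as a new group, a continuation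
-- line to the last group, drop pre-header continuation lines)
def pvGrpStep (gs : List (List String)) (ln : String) : List (List String) :=
  if PySem.Str.pyGet? ln 0 ≠ some ' ' then gs ++ [[ln]]
  else if gs ≠ [] then gs.dropLast ++ [gs.getLast! ++ [ln]]
  else gs

-- B-side helper: fold one complete group (header :: continuation lines) into the dict
def pvProcG (d : PySem.Dict String (List String)) (g : List String) :
    PySem.Dict String (List String) :=
  match g with
  | [] => d           -- unreachable: groups are never empty
  | header :: cont =>
    match PySem.Str.split₀Max header 1 with
    | [] => d         -- Python raises IndexError (parts[0]) here; excluded by Pre_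
    | p0 :: rest =>
      (d.setdefault p0 []).modify p0 [] (· ++ (rest ++ cont.map PySem.Str.strip))

def parse_flat_py_alt (body : String) : List (String × List String) :=
  let lines := (PySem.Str.splitlines body).filter (· != "")
  ((lines.foldl pvGrpStep []).foldl pvProcG (PySem.Dict.empty : PySem.Dict String (List String))).items

-- ===== PRECONDITION & SPEC =====
-- Pre_ excludes bodies containing a non-empty line that does not start with a space yet consists
-- entirely of whitespace (its split yields no word): on such lines both A and B raise IndexError.
def Pre_parse_flat_py (body : String) : Prop :=
  ∀ line ∈ PySem.Str.splitlines body,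
    line ≠ "" → PySem.Str.pyGet? line 0 ≠ some ' ' → PySem.Str.split₀Max line 1 ≠ []
instance (body : String) : Decidable (Pre_parse_flat_py body) := by
  unfold Pre_parse_flat_py; infer_instance

def pvWitness_parse_flat_py : String := "ENTRY  10458\nNAME  EZR\n  moesin\n\nSEQ  ab"

def Spec_parse_flat_py (body : String) (out : List (String × List String)) : Prop :=
  out = parse_flat_py_alt body
instance (body : String) (out : List (String × List String)) : Decidable (Spec_parse_flat_py body out) := by
  unfold Spec_parse_flat_py; infer_instance

-- ===== CLAIM (what is proved, stated in full; the proofs are below) =====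
def Claim_equal_parse_flat_py : Prop :=
  ∀ (body : String), Dom_parse_flat_py body → Pre_parse_flat_py body →
    Spec_parse_flat_py body (parse_flat_py body)

-- ===== LEMMAS AND PROOFS =====

-- the key (first token of the header) of the last group, if any
def pvKeyOf (gs : List (List String)) : Option String :=
  gs.getLast?.bind (fun g => (PySem.Str.split₀Max g.headI 1).head?)

lemma pv_foldl_filter {α β : Type} (f : β → α → β) (p : α → Bool)
    (hf : ∀ st a, p a = false → f st a = st) :
    ∀ (l : List α) (st : β), l.foldl f st = (l.filter p).foldl f st := by
  intro l
  induction l with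
  | nil => intro st; rfl
  | cons a l ih =>
    intro st
    by_cases h : p a = true
    · simp [h, ih]
    · simp only [Bool.not_eq_true] at h
      simp [h, hf st a h, ih]

lemma pv_go_len : ∀ (fuel m : Nat) (l : List Char) (acc : List (List Char)),
    (PySem.Chars.split₀Max.go fuel m l acc).length ≤ acc.length + m + 1 := by
  intro fuel
  induction fuel with
  | zero => intro m l acc; simp [PySem.Chars.split₀Max.go]; omega
  | succ fuel ih =>
    intro m l acc
    rw [PySem.Chars.split₀Max.go]
    cases hd : List.dropWhile PySem.Chars.isspace l with
    | nil => simp; omega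
    | cons c cs =>
      by_cases hm : m = 0
      · simp [hm]
      · simp only [hm, if_false]
        have := ih (m - 1) (List.dropWhile (fun c => !PySem.Chars.isspace c) (c :: cs))
          (List.takeWhile (fun c => !PySem.Chars.isspace c) (c :: cs) :: acc)
        simp only [List.length_cons] at this
        omega

lemma pv_split1_len (s : String) : (PySem.Str.split₀Max s 1).length ≤ 2 := by
  have h : (PySem.Chars.split₀Max s.toList 1).length ≤ 2 := by
    rw [PySem.Chars.split₀Max]
    norm_num
    have := pv_go_len (s.toList.length + 1) 1 s.toList []
    simpa using this
  simpa [PySem.Str.split₀Max] using h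

lemma pv_setdefault_modify (d : PySem.Dict String (List String)) (k : String) (xs : List String) :
    (d.setdefault k []).modify k [] (· ++ xs) = d.modify k [] (· ++ xs) := by
  simp only [PySem.Dict.modify, PySem.Dict.getD_setdefault_self]
  by_cases hc : d.contains k = true
  · rw [PySem.Dict.setdefault_of_contains d [] hc]
  · rw [PySem.Dict.setdefault_of_not_contains d [] (by simpa using hc),
      PySem.Dict.insert_insert_self]

lemma pv_modify_modify (d : PySem.Dict String (List String)) (k : String) (a b : List String) :
    (d.modify k [] (· ++ a)).modify k [] (· ++ b) = d.modify k [] (· ++ (a ++ b)) := by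
  simp [PySem.Dict.modify, PySem.Dict.getD_insert_self, PySem.Dict.insert_insert_self]

lemma pv_nodup_modify (d : PySem.Dict String (List String)) (k : String) (f : List String → List String)
    (h : d.keys.Nodup) : (d.modify k [] f).keys.Nodup := by
  simp only [PySem.Dict.modify]
  exact PySem.Dict.nodup_keys_insert _ _ _ h

lemma pv_nodup_setdefault (d : PySem.Dict String (List String)) (k : String)
    (h : d.keys.Nodup) : (d.setdefault k []).keys.Nodup := by
  by_cases hc : d.contains k = true
  · rw [PySem.Dict.setdefault_of_contains d [] hc]; exact h
  · rw [PySem.Dict.setdefault_of_not_contains d [] (by simpa using hc)]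
    exact PySem.Dict.nodup_keys_insert _ _ _ h

lemma pv_setdefault_eq_modify_nil (d : PySem.Dict String (List String)) (k : String)
    (h : d.keys.Nodup) : d.setdefault k [] = d.modify k [] (· ++ []) := by
  simp only [PySem.Dict.modify, List.append_nil]
  by_cases hc : d.contains k = true
  · rw [PySem.Dict.setdefault_of_contains d [] hc]
    apply PySem.Dict.ext
    rw [PySem.Dict.items_insert_of_contains d _ hc]
    have hcong : ∀ p ∈ d.items, (if (p.1 == k) = true then (k, d.getD k []) else p) = p := by
      intro p hp
      by_cases hk : (p.1 == k) = true
      · simp only [hk, if_true]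
        have hk' : p.1 = k := by simpa using hk
        have hv : d.getD p.1 [] = p.2 := PySem.Dict.getD_of_mem_items d (by simpa using hp) h []
        rw [← hk', hv]
      · simp [hk]
    rw [List.map_congr_left hcong]
    simp
  · rw [PySem.Dict.setdefault_of_not_contains d [] (by simpa using hc),
      PySem.Dict.getD_of_not_contains d [] (by simpa using hc)]

lemma pv_getLast!_concat (l : List (List String)) (a : List String) :
    (l ++ [a]).getLast! = a := by
  induction l with
  | nil => rfl
  | cons x xs ih => simpa [List.getLast!, List.getLast?_concat] using ih

lemma pv_main (L : List String)
    (h1 : ∀ l ∈ L, l ≠ "")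
    (h2 : ∀ l ∈ L, PySem.Str.pyGet? l 0 ≠ some ' ' → PySem.Str.split₀Max l 1 ≠ []) :
    L.foldl pvStepA ((PySem.Dict.empty : PySem.Dict String (List String)), (none : Option String))
        = ((L.foldl pvGrpStep []).foldl pvProcG PySem.Dict.empty, pvKeyOf (L.foldl pvGrpStep []))
      ∧ (∀ g ∈ L.foldl pvGrpStep [], g ≠ [] ∧ PySem.Str.split₀Max g.headI 1 ≠ [])
      ∧ ((L.foldl pvGrpStep []).foldl pvProcG PySem.Dict.empty).keys.Nodup := by
  induction L using List.reverseRecOn with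
  | nil =>
    refine ⟨rfl, by simp, ?_⟩
    simp [PySem.Dict.empty, PySem.Dict.keys]
  | append_singleton L ln ih =>
    have h1' : ∀ l ∈ L, l ≠ "" := fun l hl => h1 l (by simp [hl])
    have h2' : ∀ l ∈ L, PySem.Str.pyGet? l 0 ≠ some ' ' → PySem.Str.split₀Max l 1 ≠ [] :=
      fun l hl => h2 l (by simp [hl])
    obtain ⟨hEq, hGood, hNodup⟩ := ih h1' h2'
    have hln : ln ≠ "" := h1 ln (by simp)
    simp only [List.foldl_append, List.foldl_cons, List.foldl_nil]
    rw [hEq]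
    set gs := L.foldl pvGrpStep [] with hgs
    set d := gs.foldl pvProcG PySem.Dict.empty with hd
    by_cases hH : PySem.Str.pyGet? ln 0 ≠ some ' '
    · -- header line
      have hHb : ¬ PySem.List.pyGet? ln.toList 0 = some ' ' := by
        simpa [PySem.Str.pyGet?] using hH
      obtain ⟨p0, rest, hsplit⟩ : ∃ p0 rest, PySem.Str.split₀Max ln 1 = p0 :: rest := by
        cases hs : PySem.Str.split₀Max ln 1 with
        | nil => exact absurd hs (h2 ln (by simp) hH)
        | cons a b => exact ⟨a, b, rfl⟩
      have hgrp : pvGrpStep gs ln = gs ++ [[ln]] := by simp [pvGrpStep, hHb]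
      rw [hgrp, List.foldl_append]
      simp only [List.foldl_cons, List.foldl_nil]
      have hB : pvProcG d [ln] = (d.setdefault p0 []).modify p0 [] (· ++ rest) := by
        simp [pvProcG, hsplit]
      have hkey : pvKeyOf (gs ++ [[ln]]) = some p0 := by
        simp [pvKeyOf, List.getLast?_concat, hsplit]
      have hrest2 : rest = [] ∨ ∃ p1, rest = [p1] := by
        have hl2 := pv_split1_len ln
        rw [hsplit] at hl2
        cases rest with
        | nil => exact Or.inl rfl
        | cons p1 r =>
          cases r with
          | nil => exact Or.inr ⟨p1, rfl⟩
          | cons x y => simp at hl2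
      have hA : pvStepA (d, pvKeyOf gs) ln =
          (pvProcG d [ln], some p0) := by
        rcases hrest2 with h0 | ⟨p1, hp1⟩
        · subst h0
          rw [hB, pv_setdefault_modify d p0 [], ← pv_setdefault_eq_modify_nil d p0 hNodup]
          simp [pvStepA, hln, hHb, hsplit]
        · subst hp1
          rw [hB]
          simp [pvStepA, hln, hHb, hsplit]
      refine ⟨by rw [hA, hkey], ?_, ?_⟩
      · intro g hg
        rcases List.mem_append.mp hg with hg | hg
        · exact hGood g hg
        · simp only [List.mem_singleton] at hg
          subst hg
          exact ⟨by simp, by simp [hsplit]⟩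
      · rw [hB]
        exact pv_nodup_modify _ _ _ (pv_nodup_setdefault d p0 hNodup)
    · -- continuation line
      have hH' : PySem.Str.pyGet? ln 0 = some ' ' := by
        by_contra h; exact hH h
      have hH'b : PySem.List.pyGet? ln.toList 0 = some ' ' := by
        simpa [PySem.Str.pyGet?] using hH'
      rcases List.eq_nil_or_concat gs with hnil | ⟨gs₀, g, hcat⟩
      · rw [hnil]
        have hgrp : pvGrpStep [] ln = [] := by simp [pvGrpStep, hH'b]
        rw [hgrp]
        have hA : pvStepA (d, pvKeyOf ([] : List (List String))) ln
            = (d, pvKeyOf ([] : List (List String))) := by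
          simp [pvStepA, hln, hH'b, pvKeyOf]
        rw [hnil] at hd
        refine ⟨by rw [hA, hd], by simp, by rw [← hd]; exact hNodup⟩
      · rw [List.concat_eq_append] at hcat
        obtain ⟨hgne, hgsp⟩ := hGood g (by simp [hcat])
        cases g with
        | nil => exact absurd rfl hgne
        | cons hd0 tl =>
        obtain ⟨p0, rest, hsplit⟩ : ∃ p0 rest, PySem.Str.split₀Max hd0 1 = p0 :: rest := by
          cases hs : PySem.Str.split₀Max hd0 1 with
          | nil => rw [List.headI_cons] at hgsp; exact absurd hs hgsp
          | cons a b => exact ⟨a, b, rfl⟩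
        have hgrp : pvGrpStep gs ln = gs₀ ++ [(hd0 :: tl) ++ [ln]] := by
          rw [pvGrpStep, if_neg (by simp [hH'b]), if_pos (by simp [hcat])]
          rw [hcat, List.dropLast_concat, pv_getLast!_concat]
        have hkeygs : pvKeyOf gs = some p0 := by
          simp [pvKeyOf, hcat, List.getLast?_concat, hsplit]
        -- the accumulated dict after gs₀ and after gs
        set d0 := gs₀.foldl pvProcG (PySem.Dict.empty : PySem.Dict String (List String)) with hd0'
        have hdval : d = pvProcG d0 (hd0 :: tl) := by
          rw [hd, hcat, List.foldl_append, List.foldl_cons, List.foldl_nil, ← hd0']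
        have hstep : pvProcG d0 (hd0 :: (tl ++ [ln]))
            = (pvProcG d0 (hd0 :: tl)).modify p0 [] (· ++ [PySem.Str.strip ln]) := by
          simp only [pvProcG, hsplit]
          rw [pv_setdefault_modify, pv_setdefault_modify]
          rw [pv_modify_modify]
          simp [List.append_assoc]
        have hA : pvStepA (d, pvKeyOf gs) ln
            = (d.modify p0 [] (· ++ [PySem.Str.strip ln]), some p0) := by
          rw [hkeygs]
          simp [pvStepA, hln, hH'b]
        have hnewdict : (gs₀ ++ [(hd0 :: tl) ++ [ln]]).foldl pvProcG PySem.Dict.empty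
            = d.modify p0 [] (· ++ [PySem.Str.strip ln]) := by
          rw [List.foldl_append]
          simp only [List.foldl_cons, List.foldl_nil, ← hd0']
          rw [List.cons_append, hstep, ← hdval]
        have hkeynew : pvKeyOf (gs₀ ++ [(hd0 :: tl) ++ [ln]]) = some p0 := by
          simp [pvKeyOf, List.getLast?_concat, hsplit]
        refine ⟨?_, ?_, ?_⟩
        · rw [hgrp, hA, hnewdict, hkeynew]
        · rw [hgrp]
          intro g' hg'
          rcases List.mem_append.mp hg' with hg' | hg'
          · exact hGood g' (by simp [hcat, hg'])
          · simp only [List.mem_singleton] at hg'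
            subst hg'
            exact ⟨by simp, by simpa using hgsp⟩
        · rw [hgrp, hnewdict]
          exact pv_nodup_modify _ _ _ hNodup

-- ===== VERDICT (by name: the statement is the Claim_ definition above) =====
theorem parse_flat_py_spec : Claim_equal_parse_flat_py := by
  intro body hdom hpre
  show parse_flat_py body = parse_flat_py_alt body
  unfold parse_flat_py parse_flat_py_alt
  rw [pv_foldl_filter pvStepA (· != "")
    (by intro st a h; simp only [bne_eq_false_iff_eq] at h; simp [pvStepA, h])]
  have h1 : ∀ l ∈ (PySem.Str.splitlines body).filter (· != ""), l ≠ "" := by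
    intro l hl
    have := List.mem_filter.mp hl
    simpa using this.2
  have h2 : ∀ l ∈ (PySem.Str.splitlines body).filter (· != ""),
      PySem.Str.pyGet? l 0 ≠ some ' ' → PySem.Str.split₀Max l 1 ≠ [] := by
    intro l hl hh
    exact hpre l (List.mem_filter.mp hl).1 (h1 l hl) hh
  rw [(pv_main _ h1 h2).1]
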